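-- pv_equiv track=rewrite | github.com/Emerge-world/emerge | simulation/benchmark_report.py | _summarize_verdicts
-- ===== SOURCE A (Python) =====
-- def _summarize_verdicts(verdicts: list[str]) -> str:
--     improved = sum(1 for verdict in verdicts if verdict == "improved")
--     regressed = sum(1 for verdict in verdicts if verdict == "regressed")
--     if improved > regressed:
--         return "improved"
--     if regressed > improved:
--         return "regressed"
--     return "flat"
-- ===== SOURCE B (Python) =====
-- _DELTA = {"improved": 1, "regressed": -1}
--
-- def _summarize_verdicts(verdicts: list[str]) -> str:
--     score = sum(_DELTA.get(v, 0) for v in verdicts)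
--     return "improved" if score > 0 else "regressed" if score < 0 else "flat"
-- ===== Notes on version B (the rewrite author's own statement) =====
-- stated objective: alternative
-- what changed: Replaces A's two separate equality-counting passes and count comparison by a single pass summing per-verdict deltas looked up in a static {'improved': 1, 'regressed': -1} table, followed by a sign test on the signed score.
import Mathlib
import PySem

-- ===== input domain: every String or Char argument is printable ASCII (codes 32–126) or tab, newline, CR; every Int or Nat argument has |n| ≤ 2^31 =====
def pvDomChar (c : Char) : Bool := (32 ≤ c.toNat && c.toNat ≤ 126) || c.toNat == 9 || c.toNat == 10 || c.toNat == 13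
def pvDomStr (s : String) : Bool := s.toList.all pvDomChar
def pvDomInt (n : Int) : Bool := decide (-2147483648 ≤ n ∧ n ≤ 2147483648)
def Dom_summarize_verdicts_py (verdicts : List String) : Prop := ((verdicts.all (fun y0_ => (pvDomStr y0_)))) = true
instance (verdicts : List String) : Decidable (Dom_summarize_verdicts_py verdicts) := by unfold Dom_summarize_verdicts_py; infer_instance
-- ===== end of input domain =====

-- B replaces A's two equality-counting passes and count comparison by one pass summing table-looked-up deltas and a sign test (alternative decomposition, same cost).

-- ===== PORT A =====
-- A: two generator-sum passes counting "improved" and "regressed", then compare the counts.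
def summarize_verdicts_py (verdicts : List String) : String :=
  let improved := verdicts.foldl (fun acc v => if v = "improved" then acc + 1 else acc) (0 : Int)
  let regressed := verdicts.foldl (fun acc v => if v = "regressed" then acc + 1 else acc) (0 : Int)
  if improved > regressed then "improved"
  else if regressed > improved then "regressed"
  else "flat"

-- ===== PORT B =====
-- B: one sum over the per-verdict deltas from the static table, then a sign test.
def pvDelta : PySem.Dict String Int := PySem.Dict.ofList [("improved", 1), ("regressed", -1)]

def summarize_verdicts_py_alt (verdicts : List String) : String :=
  let score := (verdicts.map (fun v => pvDelta.getD v 0)).sum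
  if score > 0 then "improved" else if score < 0 then "regressed" else "flat"

-- ===== PRECONDITION & SPEC =====
def Spec_summarize_verdicts_py (verdicts : List String) (out : String) : Prop := out = summarize_verdicts_py_alt verdicts
instance (verdicts : List String) (out : String) : Decidable (Spec_summarize_verdicts_py verdicts out) := by unfold Spec_summarize_verdicts_py; infer_instance

-- ===== CLAIM (what is proved, stated in full; the proofs are below) =====
def Claim_equal_summarize_verdicts_py : Prop := ∀ (verdicts : List String), Dom_summarize_verdicts_py verdicts → Spec_summarize_verdicts_py verdicts (summarize_verdicts_py verdicts)

-- ===== LEMMAS AND PROOFS =====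

theorem pv_delta_getD (v : String) :
    pvDelta.getD v 0 = (if v = "improved" then (1 : Int) else if v = "regressed" then -1 else 0) := by
  have h : pvDelta = PySem.Dict.mk [("improved", (1:Int)), ("regressed", -1)] := by decide
  rw [h, PySem.Dict.getD_eq_get?_getD, PySem.Dict.get?_mk_cons, PySem.Dict.get?_mk_cons]
  simp only [beq_iff_eq]
  by_cases h1 : v = "improved"
  · rw [if_pos h1.symm, if_pos h1]; rfl
  · rw [if_neg (fun hh => h1 hh.symm), if_neg h1]
    by_cases h2 : v = "regressed"
    · rw [if_pos h2.symm, if_pos h2]; rfl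
    · rw [if_neg (fun hh => h2 hh.symm), if_neg h2]; rfl

theorem pv_count_shift (t : String) (l : List String) (a : Int) :
    l.foldl (fun acc v => if v = t then acc + 1 else acc) a
      = a + l.foldl (fun acc v => if v = t then acc + 1 else acc) 0 := by
  induction l generalizing a with
  | nil => simp
  | cons x xs ih =>
    simp only [List.foldl]
    rw [ih, ih (if x = t then 0 + 1 else 0)]
    split_ifs <;> ring

theorem pv_score_eq (l : List String) :
    (l.map (fun v => pvDelta.getD v 0)).sum
      = l.foldl (fun acc v => if v = "improved" then acc + 1 else acc) 0
          - l.foldl (fun acc v => if v = "regressed" then acc + 1 else acc) 0 := by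
  induction l with
  | nil => simp
  | cons x xs ih =>
    simp only [List.map, List.sum_cons, List.foldl]
    rw [ih, pv_delta_getD,
        pv_count_shift "improved" xs (if x = "improved" then (0:Int) + 1 else 0),
        pv_count_shift "regressed" xs (if x = "regressed" then (0:Int) + 1 else 0)]
    split_ifs <;> simp_all <;> ring

-- ===== VERDICT (by name: the statement is the Claim_ definition above) =====
theorem summarize_verdicts_py_spec : Claim_equal_summarize_verdicts_py := by
  intro verdicts _
  unfold Spec_summarize_verdicts_py summarize_verdicts_py summarize_verdicts_py_alt
  rw [pv_score_eq]
  set i := verdicts.foldl (fun acc v => if v = "improved" then acc + 1 else acc) (0 : Int)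
  set r := verdicts.foldl (fun acc v => if v = "regressed" then acc + 1 else acc) (0 : Int)
  dsimp only
  split_ifs <;> first | rfl | omega
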